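-- pv_equiv track=rewrite | github.com/Dimitrios797/homework | module_2_hard.py | find_password
-- ===== SOURCE A (Python) =====
-- def find_password(n):
--     pairs = []
--     for i in range(1, n + 1):
--         for j in range(i + 1, n + 1):
--             if n % (i + j) == 0:
--                 pairs.append(str(i) + str(j))
--
--     result = ''.join(pairs)
--     return result
-- ===== SOURCE B (Python) =====
-- def find_password(n):
--     # Precompute the divisors of n once; a pair (i, j) with i < j qualifies
--     # exactly when s = i + j is a divisor, and every positive divisor of a
--     # positive n is at most n, so j = s - i is automatically in range.
--     divs = [s for s in range(1, n + 1) if n % s == 0]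
--     parts = []
--     for i in range(1, n + 1):
--         for s in divs:
--             if s >= 2 * i + 1:
--                 parts.append(str(i) + str(s - i))
--     return ''.join(parts)
-- ===== Notes on version B (the rewrite author's own statement) =====
-- stated objective: faster
-- what changed: Instead of testing n % (i+j) == 0 for every pair i<j (O(n^2) modulo operations), B precomputes the divisor list of n once and, for each i, emits a pair for every divisor s >= 2i+1 as (i, s-i), so the inner O(n) scan over j is replaced by a scan over the ~d(n) divisors.
import Mathlib
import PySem

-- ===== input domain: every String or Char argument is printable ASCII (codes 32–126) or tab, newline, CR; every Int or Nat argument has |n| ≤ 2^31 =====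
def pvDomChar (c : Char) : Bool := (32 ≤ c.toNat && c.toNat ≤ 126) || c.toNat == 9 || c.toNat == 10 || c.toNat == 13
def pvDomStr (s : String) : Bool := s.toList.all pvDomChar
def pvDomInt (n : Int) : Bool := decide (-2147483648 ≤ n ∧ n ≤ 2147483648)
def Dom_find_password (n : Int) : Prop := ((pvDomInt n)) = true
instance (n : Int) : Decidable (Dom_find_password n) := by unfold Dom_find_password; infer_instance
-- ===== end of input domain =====

-- B replaces the O(n^2) pair scan by a precomputed divisor list: for each i the
-- qualifying j are exactly s - i for divisors s of n with s ≥ 2i+1 (faster).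

-- ===== PORT A =====
def find_password (n : Int) : String :=
  let pairs := (PySem.List.pyRange 1 (n+1) 1).foldl (fun acc i =>
    (PySem.List.pyRange (i+1) (n+1) 1).foldl (fun acc j =>
      if PySem.Int.mod n (i+j) == 0 then acc ++ [PySem.Int.toStr i ++ PySem.Int.toStr j]
      else acc) acc) []
  PySem.Str.join "" pairs

-- ===== PORT B =====
def find_password_alt (n : Int) : String :=
  let divs := (PySem.List.pyRange 1 (n+1) 1).filter (fun s => PySem.Int.mod n s == 0)
  let parts := (PySem.List.pyRange 1 (n+1) 1).foldl (fun acc i =>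
    divs.foldl (fun acc s =>
      if 2*i+1 ≤ s then acc ++ [PySem.Int.toStr i ++ PySem.Int.toStr (s - i)]
      else acc) acc) []
  PySem.Str.join "" parts

-- ===== PRECONDITION & SPEC =====
def Spec_find_password (n : Int) (out : String) : Prop := out = find_password_alt n
instance (n : Int) (out : String) : Decidable (Spec_find_password n out) := by unfold Spec_find_password; infer_instance

-- ===== CLAIM (what is proved, stated in full; the proofs are below) =====
def Claim_equal_find_password : Prop := ∀ (n : Int), Dom_find_password n → Spec_find_password n (find_password n)

-- ===== LEMMAS AND PROOFS =====

-- the per-i block of A's pairs list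
def blockA (n i : Int) : List String :=
  ((PySem.List.pyRange (i+1) (n+1) 1).filter (fun j => PySem.Int.mod n (i+j) == 0)).map
    (fun j => PySem.Int.toStr i ++ PySem.Int.toStr j)

-- the per-i block of B's parts list
def blockB (n i : Int) : List String :=
  (((PySem.List.pyRange 1 (n+1) 1).filter (fun s => PySem.Int.mod n s == 0)).filter
      (fun s => decide (2*i+1 ≤ s))).map
    (fun s => PySem.Int.toStr i ++ PySem.Int.toStr (s - i))

-- shifting a range: range(i+1, n+1) shifted by +i is range(2i+1, n+i+1)
lemma pyRange_shift (n i : Int) :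
    (PySem.List.pyRange (i+1) (n+1) 1).map (fun j => j + i)
      = PySem.List.pyRange (2*i+1) (n+i+1) 1 := by
  rw [PySem.List.pyRange_one, PySem.List.pyRange_one, List.map_map]
  have h : (n + 1 - (i + 1)).toNat = (n + i + 1 - (2*i+1)).toNat := by omega
  rw [h]
  apply List.map_congr_left
  intro k _
  simp only [Function.comp]
  omega

lemma blockA_eq_blockB (n i : Int) (hi : 1 ≤ i) (hin : i ≤ n) :
    blockA n i = blockB n i := by
  have hshift := pyRange_shift n i
  -- rewrite blockB's double filter over range 1..n as a filter over the shifted range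
  have key : ((PySem.List.pyRange 1 (n+1) 1).filter (fun s => PySem.Int.mod n s == 0)).filter
        (fun s => decide (2*i+1 ≤ s))
      = (PySem.List.pyRange (2*i+1) (n+i+1) 1).filter (fun s => PySem.Int.mod n s == 0) := by
    have conj : ∀ (l : List Int),
        (l.filter (fun s => PySem.Int.mod n s == 0)).filter (fun s => decide (2*i+1 ≤ s))
        = l.filter (fun s => decide (2*i+1 ≤ s) && (PySem.Int.mod n s == 0)) := by
      intro l
      rw [List.filter_filter]
    -- both sides equal the conjunction-filter over range 1 .. n+i
    have hsplitL : PySem.List.pyRange 1 (n+i+1) 1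
        = PySem.List.pyRange 1 (n+1) 1 ++ PySem.List.pyRange (n+1) (n+i+1) 1 :=
      PySem.List.pyRange_one_append 1 (n+1) (n+i+1) (by omega) (by omega)
    have hsplitR : PySem.List.pyRange 1 (n+i+1) 1
        = PySem.List.pyRange 1 (2*i+1) 1 ++ PySem.List.pyRange (2*i+1) (n+i+1) 1 :=
      PySem.List.pyRange_one_append 1 (2*i+1) (n+i+1) (by omega) (by omega)
    have hL : (PySem.List.pyRange 1 (n+i+1) 1).filter
          (fun s => decide (2*i+1 ≤ s) && (PySem.Int.mod n s == 0))
        = ((PySem.List.pyRange 1 (n+1) 1).filter (fun s => PySem.Int.mod n s == 0)).filter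
          (fun s => decide (2*i+1 ≤ s)) := by
      rw [hsplitL, List.filter_append, conj]
      have h2 : (PySem.List.pyRange (n+1) (n+i+1) 1).filter
          (fun s => decide (2*i+1 ≤ s) && (PySem.Int.mod n s == 0)) = [] := by
        rw [List.filter_eq_nil_iff]
        intro s hs
        rw [PySem.List.mem_pyRange_one] at hs
        have hdvd : ¬ (s ∣ n) := by
          intro hd
          have := Int.le_of_dvd (by omega) hd
          omega
        have : PySem.Int.mod n s ≠ 0 := by
          rw [Ne, PySem.Int.mod_eq_zero_iff_dvd]; exact hdvd
        simp [this]
      rw [h2, List.append_nil]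
    have hR : (PySem.List.pyRange 1 (n+i+1) 1).filter
          (fun s => decide (2*i+1 ≤ s) && (PySem.Int.mod n s == 0))
        = (PySem.List.pyRange (2*i+1) (n+i+1) 1).filter (fun s => PySem.Int.mod n s == 0) := by
      rw [hsplitR, List.filter_append]
      have h1 : (PySem.List.pyRange 1 (2*i+1) 1).filter
          (fun s => decide (2*i+1 ≤ s) && (PySem.Int.mod n s == 0)) = [] := by
        rw [List.filter_eq_nil_iff]
        intro s hs
        rw [PySem.List.mem_pyRange_one] at hs
        simp [show ¬ (2*i+1 ≤ s) by omega]
      have h2 : (PySem.List.pyRange (2*i+1) (n+i+1) 1).filter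
          (fun s => decide (2*i+1 ≤ s) && (PySem.Int.mod n s == 0))
          = (PySem.List.pyRange (2*i+1) (n+i+1) 1).filter (fun s => PySem.Int.mod n s == 0) := by
        apply List.filter_congr
        intro s hs
        rw [PySem.List.mem_pyRange_one] at hs
        simp [show (2*i+1 ≤ s) by omega]
      rw [h1, h2, List.nil_append]
    rw [← hL, hR]
  unfold blockA blockB
  rw [key, ← hshift, List.filter_map, List.map_map]
  have hf : (PySem.List.pyRange (i+1) (n+1) 1).filter ((fun s => PySem.Int.mod n s == 0) ∘ fun j => j + i)
      = (PySem.List.pyRange (i+1) (n+1) 1).filter (fun j => PySem.Int.mod n (i+j) == 0) :=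
    List.filter_congr (fun j _ => by simp only [Function.comp]; rw [Int.add_comm j i])
  rw [hf]
  apply List.map_congr_left
  intro j _
  simp only [Function.comp]
  congr 2
  omega

-- A's pairs list as a flatMap of per-i blocks
lemma pairsA_eq (n : Int) :
    ((PySem.List.pyRange 1 (n+1) 1).foldl (fun acc i =>
      (PySem.List.pyRange (i+1) (n+1) 1).foldl (fun acc j =>
        if PySem.Int.mod n (i+j) == 0 then acc ++ [PySem.Int.toStr i ++ PySem.Int.toStr j]
        else acc) acc) ([] : List String))
    = (PySem.List.pyRange 1 (n+1) 1).flatMap (blockA n) := by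
  have h1 : ((PySem.List.pyRange 1 (n+1) 1).foldl (fun acc i =>
      (PySem.List.pyRange (i+1) (n+1) 1).foldl (fun acc j =>
        if PySem.Int.mod n (i+j) == 0 then acc ++ [PySem.Int.toStr i ++ PySem.Int.toStr j]
        else acc) acc) ([] : List String))
      = (PySem.List.pyRange 1 (n+1) 1).foldl (fun acc i => acc ++ blockA n i) [] :=
    PySem.List.foldl_congr_mem _ _ _ _ (by intro acc i _; rw [PySem.List.foldl_append_if]; rfl)
  rw [h1, PySem.List.foldl_append_eq_flatMap, List.nil_append]

-- B's parts list as a flatMap of per-i blocks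
lemma partsB_eq (n : Int) :
    ((PySem.List.pyRange 1 (n+1) 1).foldl (fun acc i =>
      ((PySem.List.pyRange 1 (n+1) 1).filter (fun s => PySem.Int.mod n s == 0)).foldl
        (fun acc s =>
          if 2*i+1 ≤ s then acc ++ [PySem.Int.toStr i ++ PySem.Int.toStr (s - i)]
          else acc) acc) ([] : List String))
    = (PySem.List.pyRange 1 (n+1) 1).flatMap (blockB n) := by
  have h1 : ((PySem.List.pyRange 1 (n+1) 1).foldl (fun acc i =>
      ((PySem.List.pyRange 1 (n+1) 1).filter (fun s => PySem.Int.mod n s == 0)).foldl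
        (fun acc s =>
          if 2*i+1 ≤ s then acc ++ [PySem.Int.toStr i ++ PySem.Int.toStr (s - i)]
          else acc) acc) ([] : List String))
      = (PySem.List.pyRange 1 (n+1) 1).foldl (fun acc i => acc ++ blockB n i) [] :=
    PySem.List.foldl_congr_mem _ _ _ _ (by intro acc i _; rw [PySem.List.foldl_append_ite]; rfl)
  rw [h1, PySem.List.foldl_append_eq_flatMap, List.nil_append]

-- ===== VERDICT (by name: the statement is the Claim_ definition above) =====
theorem find_password_spec : Claim_equal_find_password := by
  intro n _
  unfold Spec_find_password find_password find_password_alt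
  simp only []
  rw [pairsA_eq, partsB_eq]
  congr 1
  apply List.flatMap_congr
  intro i hi
  rw [PySem.List.mem_pyRange_one] at hi
  exact blockA_eq_blockB n i hi.1 (by omega)
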